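-- pv_equiv track=rewrite | github.com/patiltrupti6105/AIML | data_fetcher.py | _download_candidates
-- ===== SOURCE A (Python) =====
-- from typing import Dict, List, Optional, Tuple
--
-- def _download_candidates(symbol: str, period: str, interval: str) -> List[Tuple[str, str, str]]:
--     """
--     Generate a list of (method, period, interval) to try in order.
--     method ∈ {"download","history"}
--     """
--     # Try the requested period/interval first, then expand
--     periods = [period, "2y", "5y", "1y"]
--     intervals = [interval, "1d", "1wk"]
--     tried = []
--     for p in periods:
--         for iv in intervals:
--             tried.append(("download", p, iv))
--     # Then history() which often succeeds where download fails
--     for p in periods: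
--         for iv in intervals:
--             tried.append(("history", p, iv))
--     # Deduplicate while preserving order
--     seen = set()
--     dedup = []
--     for t in tried:
--         if t not in seen:
--             dedup.append(t)
--             seen.add(t)
--     return dedup
-- ===== SOURCE B (Python) =====
-- def _download_candidates(symbol, period, interval):
--     """
--     Generate a list of (method, period, interval) to try in order.
--     method in {"download","history"}
--     """
--     # Duplicates can only come from the requested period/interval equalling a
--     # default, so dedupe each axis once and emit the plain cross product.
--     periods = [period] + [p for p in ("2y", "5y", "1y") if p != period]
--     intervals = [interval] + [iv for iv in ("1d", "1wk") if iv != interval]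
--     return [(m, p, iv)
--             for m in ("download", "history")
--             for p in periods
--             for iv in intervals]
-- ===== Notes on version B (the rewrite author's own statement) =====
-- stated objective: simpler
-- what changed: B removes the dedup machinery entirely: it deduplicates each axis independently (appending only the default periods/intervals that differ from the requested ones) and returns the plain method x period x interval cross product, instead of A's build-24-tuples-then-filter-with-a-seen-set pass.
import Mathlib
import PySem

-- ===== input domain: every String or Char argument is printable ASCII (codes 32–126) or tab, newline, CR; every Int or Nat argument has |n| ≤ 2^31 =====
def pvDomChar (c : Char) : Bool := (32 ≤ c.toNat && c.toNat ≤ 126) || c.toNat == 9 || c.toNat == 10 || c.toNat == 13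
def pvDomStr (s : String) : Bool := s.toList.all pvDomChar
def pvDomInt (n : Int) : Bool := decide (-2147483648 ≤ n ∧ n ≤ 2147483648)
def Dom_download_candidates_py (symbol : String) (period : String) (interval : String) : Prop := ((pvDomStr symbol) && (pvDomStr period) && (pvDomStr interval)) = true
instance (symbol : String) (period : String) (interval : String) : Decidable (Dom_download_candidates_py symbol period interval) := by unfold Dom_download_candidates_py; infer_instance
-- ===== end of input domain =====

-- B drops the dedup pass entirely: each axis is deduplicated independently and the
-- result is the plain method x period x interval cross product (simpler decomposition).


-- ===== PORT A =====
-- Literal transliteration of A: build the 24-element 'tried' list with two passes of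
-- nested loops, then deduplicate it with a seen-set loop.
def download_candidates_py (symbol : String) (period : String) (interval : String) : List (String × String × String) :=
  let periods := [period, "2y", "5y", "1y"]
  let intervals := [interval, "1d", "1wk"]
  let tried := periods.foldl (fun acc p =>
    intervals.foldl (fun acc iv => acc ++ [("download", p, iv)]) acc) []
  let tried := periods.foldl (fun acc p =>
    intervals.foldl (fun acc iv => acc ++ [("history", p, iv)]) acc) tried
  let st := tried.foldl (fun (st : List (String × String × String) × PySem.Set (String × String × String)) t =>
    if PySem.Set.contains st.2 t then st else (st.1 ++ [t], PySem.Set.add st.2 t))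
    ([], PySem.Set.empty)
  st.1

-- ===== PORT B =====
-- Literal transliteration of B: deduplicate each axis once with a filter
-- (duplicates can only be defaults equal to the requested value), then emit the
-- plain method x period x interval cross product; no dedup pass over the result.
def download_candidates_py_alt (symbol : String) (period : String) (interval : String) : List (String × String × String) :=
  let periods := [period] ++ (["2y", "5y", "1y"].filter (fun p => p != period))
  let intervals := [interval] ++ (["1d", "1wk"].filter (fun iv => iv != interval))
  ["download", "history"].flatMap (fun m =>
    periods.flatMap (fun p => intervals.map (fun iv => (m, p, iv))))

-- ===== PRECONDITION & SPEC =====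
def Spec_download_candidates_py (symbol : String) (period : String) (interval : String) (out : List (String × String × String)) : Prop := out = download_candidates_py_alt symbol period interval
instance (symbol : String) (period : String) (interval : String) (out : List (String × String × String)) : Decidable (Spec_download_candidates_py symbol period interval out) := by unfold Spec_download_candidates_py; infer_instance

-- ===== CLAIM (what is proved, stated in full; the proofs are below) =====
def Claim_equal_download_candidates_py : Prop := ∀ (symbol : String) (period : String) (interval : String), Dom_download_candidates_py symbol period interval → Spec_download_candidates_py symbol period interval (download_candidates_py symbol period interval)

-- ===== LEMMAS AND PROOFS =====

-- proof-side names: the raw 12-pair grid, the deduped-axes grid, the two tuple constructors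
def pvGrid (period interval : String) : List (String × String) :=
  [period, "2y", "5y", "1y"].flatMap (fun p => [interval, "1d", "1wk"].map (fun iv => (p, iv)))
def pvAxes (period interval : String) : List (String × String) :=
  ([period] ++ (["2y", "5y", "1y"].filter (fun p => p != period))).flatMap (fun p =>
    ([interval] ++ (["1d", "1wk"].filter (fun iv => iv != interval))).map (fun iv => (p, iv)))
def pvF : String × String → String × String × String := fun pv => ("download", pv.1, pv.2)
def pvG : String × String → String × String × String := fun pv => ("history", pv.1, pv.2)

-- A's 'tried' list is the download block then the history block over the raw grid
theorem pvTried (period interval : String) :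
  ([period,"2y","5y","1y"].foldl (fun acc p => [interval,"1d","1wk"].foldl (fun acc iv => acc ++ [("history",p,iv)]) acc)
    ([period,"2y","5y","1y"].foldl (fun acc p => [interval,"1d","1wk"].foldl (fun acc iv => acc ++ [("download",p,iv)]) acc) []))
  = (pvGrid period interval).map pvF ++ (pvGrid period interval).map pvG := by
  simp [pvGrid, pvF, pvG, List.foldl]

-- A's (dedup, seen) fold keeps dedup = seen, so it is exactly the Set-building fold.
theorem pvA_fold_pair {α : Type} [BEq α] (l : List α) (s : List α) :
    (l.foldl (fun (st : List α × PySem.Set α) t =>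
      if PySem.Set.contains st.2 t then st else (st.1 ++ [t], PySem.Set.add st.2 t)) (s, s)).1
    = l.foldl PySem.Set.add s := by
  induction l generalizing s with
  | nil => rfl
  | cons x xs ih =>
    simp only [List.foldl]
    by_cases h : PySem.Set.contains s x = true
    · rw [if_pos h, show PySem.Set.add s x = s from by
        unfold PySem.Set.add PySem.Set.contains at *; simp [h]]
      exact ih s
    · rw [if_neg h, show PySem.Set.add s x = s ++ [x] from by
        unfold PySem.Set.add PySem.Set.contains at *; simp [h]]
      exact ih (s ++ [x])

-- fold Set.add adds nothing when every element is already present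
theorem pvFoldl_add_of_mem {α : Type} [BEq α] [LawfulBEq α] (l : List α) (s : List α)
    (h : ∀ x ∈ l, x ∈ s) : l.foldl PySem.Set.add s = s := by
  induction l with
  | nil => rfl
  | cons x xs ih =>
    simp only [List.foldl]
    rw [PySem.Set.add_of_mem (h x (by simp))]
    exact ih (fun y hy => h y (List.mem_cons_of_mem _ hy))

-- a prefix disjoint from all fed elements passes through the Set-building fold
theorem pvFoldl_add_append {α : Type} [BEq α] [LawfulBEq α] (l : List α) (a b : List α)
    (hd : ∀ x ∈ a, ∀ y ∈ l, x ≠ y) :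
    l.foldl PySem.Set.add (a ++ b) = a ++ l.foldl PySem.Set.add b := by
  induction l generalizing b with
  | nil => rfl
  | cons y ys ih =>
    simp only [List.foldl]
    have hya : y ∉ a := fun hy => (hd y hy y (by simp)) rfl
    have hstep : PySem.Set.add (a ++ b) y = a ++ PySem.Set.add b y := by
      by_cases hyb : y ∈ b
      · rw [PySem.Set.add_of_mem (by simp [hyb]), PySem.Set.add_of_mem hyb]
      · rw [PySem.Set.add_of_not_mem (by simp [hya, hyb]), PySem.Set.add_of_not_mem hyb,
          List.append_assoc]
    rw [hstep]
    exact ih (PySem.Set.add b y) (fun x hx z hz => hd x hx z (List.mem_cons_of_mem _ hz))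

-- the Set-building fold commutes with an injective map
theorem pvFoldl_add_map {α β : Type} [BEq α] [LawfulBEq α] [BEq β] [LawfulBEq β]
    (f : α → β) (hf : Function.Injective f) (l : List α) (s : List α) :
    (l.map f).foldl PySem.Set.add (s.map f) = (l.foldl PySem.Set.add s).map f := by
  induction l generalizing s with
  | nil => rfl
  | cons x xs ih =>
    simp only [List.map, List.foldl]
    have hmem : f x ∈ s.map f ↔ x ∈ s := by
      constructor
      · intro h; obtain ⟨y, hy, he⟩ := List.mem_map.mp h; exact hf he ▸ hy
      · exact fun h => List.mem_map_of_mem h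
    by_cases hx : x ∈ s
    · rw [PySem.Set.add_of_mem (hmem.mpr hx), PySem.Set.add_of_mem hx]
      exact ih s
    · rw [PySem.Set.add_of_not_mem (fun h => hx (hmem.mp h)), PySem.Set.add_of_not_mem hx,
        show s.map f ++ [f x] = (s ++ [x]).map f from by simp]
      exact ih (s ++ [x])

-- fold over a flatMap = nested fold
theorem pvFoldl_flatMap {α β γ : Type} (f : α → List β) (g : γ → β → γ) :
    ∀ (P : List α) (s : γ), (P.flatMap f).foldl g s = P.foldl (fun s p => (f p).foldl g s) s := by
  intro P
  induction P with
  | nil => intro s; rfl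
  | cons p ps ih => intro s; simp [List.flatMap_cons, List.foldl_append, ih]

-- dedup of a row-major product = product of the dedups
theorem pvCrossFold (I : List String) :
    ∀ (P D : List String),
    List.foldl (fun s p => (I.map (fun iv => (p, iv))).foldl PySem.Set.add s)
      (D.flatMap (fun p => (PySem.Set.ofList I).map (fun iv => (p, iv)))) P
    = (P.foldl PySem.Set.add D).flatMap (fun p => (PySem.Set.ofList I).map (fun iv => (p, iv))) := by
  intro P
  induction P with
  | nil => intro D; rfl
  | cons p ps ih =>
    intro D
    simp only [List.foldl]
    by_cases hp : p ∈ D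
    · rw [pvFoldl_add_of_mem _ _ (by
        intro x hx
        obtain ⟨iv, hiv, rfl⟩ := List.mem_map.mp hx
        exact List.mem_flatMap.mpr ⟨p, hp, List.mem_map_of_mem ((PySem.Set.mem_ofList _ _).mpr hiv)⟩)]
      rw [PySem.Set.add_of_mem hp]
      exact ih D
    · have h1 : (I.map (fun iv => (p, iv))).foldl PySem.Set.add
          (D.flatMap (fun q => (PySem.Set.ofList I).map (fun iv => (q, iv))) ++ [])
          = D.flatMap (fun q => (PySem.Set.ofList I).map (fun iv => (q, iv)))
            ++ (I.map (fun iv => (p, iv))).foldl PySem.Set.add [] := by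
        apply pvFoldl_add_append
        intro x hx y hy
        obtain ⟨q, hq, hx2⟩ := List.mem_flatMap.mp hx
        obtain ⟨iv1, _, rfl⟩ := List.mem_map.mp hx2
        obtain ⟨iv2, _, rfl⟩ := List.mem_map.mp hy
        intro he
        exact hp (((Prod.mk.injEq _ _ _ _).mp he).1 ▸ hq)
      rw [List.append_nil] at h1
      rw [h1]
      rw [show ([] : List (String × String)) = ([] : List String).map (fun iv => (p, iv)) from rfl,
        pvFoldl_add_map (fun iv => (p, iv)) (fun a b h => ((Prod.mk.injEq _ _ _ _).mp h).2 ) I []]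
      rw [PySem.Set.add_of_not_mem hp]
      have := ih (D ++ [p])
      rw [show (D ++ [p]).flatMap (fun q => (PySem.Set.ofList I).map (fun iv => (q, iv)))
          = D.flatMap (fun q => (PySem.Set.ofList I).map (fun iv => (q, iv)))
            ++ (PySem.Set.ofList I).map (fun iv => (p, iv)) from by simp] at this
      exact this

-- the deduped axes
theorem pvPeriods (period : String) :
    PySem.Set.ofList [period, "2y", "5y", "1y"]
    = [period] ++ (["2y", "5y", "1y"].filter (fun p => p != period)) := by
  by_cases h1 : period = "2y"
  · subst h1; decide
  by_cases h2 : period = "5y"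
  · subst h2; decide
  by_cases h3 : period = "1y"
  · subst h3; decide
  have e1 : ("2y" == period) = false := beq_eq_false_iff_ne.mpr (Ne.symm h1)
  have e2 : ("5y" == period) = false := beq_eq_false_iff_ne.mpr (Ne.symm h2)
  have e3 : ("1y" == period) = false := beq_eq_false_iff_ne.mpr (Ne.symm h3)
  simp [PySem.Set.ofList, PySem.Set.add, PySem.Set.contains, List.foldl, List.filter,
    bne, eq_comm, h1, h2, h3, e1, e2, e3]

theorem pvIntervals (interval : String) :
    PySem.Set.ofList [interval, "1d", "1wk"]
    = [interval] ++ (["1d", "1wk"].filter (fun iv => iv != interval)) := by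
  by_cases h4 : interval = "1d"
  · subst h4; decide
  by_cases h5 : interval = "1wk"
  · subst h5; decide
  have e1 : ("1d" == interval) = false := beq_eq_false_iff_ne.mpr (Ne.symm h4)
  have e2 : ("1wk" == interval) = false := beq_eq_false_iff_ne.mpr (Ne.symm h5)
  simp [PySem.Set.ofList, PySem.Set.add, PySem.Set.contains, List.foldl, List.filter,
    bne, eq_comm, h4, h5, e1, e2]

-- deduplicating the raw grid yields exactly the deduped-axes grid
theorem pvDedupGrid (period interval : String) :
    (pvGrid period interval).foldl PySem.Set.add [] = pvAxes period interval := by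
  unfold pvGrid pvAxes
  rw [pvFoldl_flatMap]
  have h := pvCrossFold [interval, "1d", "1wk"] [period, "2y", "5y", "1y"] ([] : List String)
  simp only [List.flatMap_nil] at h
  rw [h, show List.foldl PySem.Set.add [] [period, "2y", "5y", "1y"]
      = PySem.Set.ofList [period, "2y", "5y", "1y"] from rfl,
    pvPeriods, pvIntervals]

theorem pvF_inj : Function.Injective pvF := by
  intro a b h
  simp only [pvF, Prod.mk.injEq] at h
  exact Prod.ext h.2.1 h.2.2

theorem pvG_inj : Function.Injective pvG := by
  intro a b h
  simp only [pvG, Prod.mk.injEq] at h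
  exact Prod.ext h.2.1 h.2.2

theorem pvA_eq (symbol period interval : String) :
    download_candidates_py symbol period interval
    = ((pvGrid period interval).map pvF ++ (pvGrid period interval).map pvG).foldl PySem.Set.add [] := by
  simp only [download_candidates_py]
  rw [pvTried]
  exact pvA_fold_pair _ []

theorem pvB_eq (symbol period interval : String) :
    download_candidates_py_alt symbol period interval
    = (pvAxes period interval).map pvF ++ (pvAxes period interval).map pvG := by
  simp [download_candidates_py_alt, pvAxes, pvF, pvG, List.map_flatMap, List.map_map, Function.comp_def]

-- ===== VERDICT (by name: the statement is the Claim_ definition above) =====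
theorem download_candidates_py_spec : Claim_equal_download_candidates_py := by
  intro symbol period interval _
  unfold Spec_download_candidates_py
  rw [pvA_eq, pvB_eq, List.foldl_append]
  rw [show ([] : List (String × String × String)) = ([] : List (String × String)).map pvF from rfl,
    pvFoldl_add_map pvF pvF_inj]
  set D := (pvGrid period interval).foldl PySem.Set.add [] with hD
  have hdisj : ∀ x ∈ D.map pvF, ∀ y ∈ (pvGrid period interval).map pvG, x ≠ y := by
    rintro x hx y hy
    obtain ⟨u, _, rfl⟩ := List.mem_map.mp hx
    obtain ⟨v, _, rfl⟩ := List.mem_map.mp hy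
    simp [pvF, pvG]
  calc List.foldl PySem.Set.add (D.map pvF) ((pvGrid period interval).map pvG)
      = List.foldl PySem.Set.add (D.map pvF ++ []) ((pvGrid period interval).map pvG) := by
        rw [List.append_nil]
    _ = D.map pvF ++ List.foldl PySem.Set.add [] ((pvGrid period interval).map pvG) :=
        pvFoldl_add_append _ _ _ hdisj
    _ = D.map pvF ++ D.map pvG := by
        rw [show ([] : List (String × String × String)) = ([] : List (String × String)).map pvG from rfl,
          pvFoldl_add_map pvG pvG_inj]
    _ = (pvAxes period interval).map pvF ++ (pvAxes period interval).map pvG := by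
        rw [hD, pvDedupGrid]
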